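-- pv_equiv track=rewrite | github.com/exastro-suite/exastro-it-automation | ita_root/common_libs/ansible_driver/classes/CheckAnsibleRoleFiles.py | MemberVariableNamePattenMatch
-- ===== SOURCE A (Python) =====
-- def MemberVariableNamePattenMatch(in_string):
--
--     """
--     処理内容
--       メンバー変数名の妥当性を判定する。
--       メンバー変数で許容しない記号  . [ ]  合計3文字
--
--     パラメータ
--       in_string: 変数名
--
--     戻り値
--       true:正常  false:異常
--     """
--
--     # メンバー変数で許容しない記号  . [ ]  合計3文字
--     fail_char_string = ".[]"
--     for ch in fail_char_string:
--         ret = in_string.find(ch)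
--         if ret >= 0:
--             return False
--
--         else:
--             continue
--
--     return True
-- ===== SOURCE B (Python) =====
-- def MemberVariableNamePattenMatch(in_string):
--     """Single pass over the input: fail on the first forbidden character."""
--     forbidden = frozenset(".[]")
--     for ch in in_string:
--         if ch in forbidden:
--             return False
--     return True
-- ===== Notes on version B (the rewrite author's own statement) =====
-- stated objective: simpler
-- what changed: Instead of scanning the whole string once per forbidden character via str.find, B traverses the input once and returns False at the first character found in a frozenset of the three forbidden characters.
import Mathlib
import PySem

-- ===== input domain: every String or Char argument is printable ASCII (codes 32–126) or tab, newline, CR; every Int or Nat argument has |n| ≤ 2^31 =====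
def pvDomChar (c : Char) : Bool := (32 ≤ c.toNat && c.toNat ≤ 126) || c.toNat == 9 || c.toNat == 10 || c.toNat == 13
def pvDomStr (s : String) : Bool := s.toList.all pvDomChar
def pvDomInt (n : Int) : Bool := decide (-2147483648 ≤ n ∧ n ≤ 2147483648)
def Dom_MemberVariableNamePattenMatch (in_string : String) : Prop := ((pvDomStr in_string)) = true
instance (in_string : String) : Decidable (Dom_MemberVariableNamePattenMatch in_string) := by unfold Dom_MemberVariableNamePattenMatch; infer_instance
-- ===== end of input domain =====

-- B replaces A's per-forbidden-character str.find scans by one pass over the input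
-- checking each character against the forbidden set; same return value, simpler shape.
-- ===== PORT A =====
-- loop 'for ch in ".[]"': if in_string.find(ch) >= 0 return False; after the loop return True
def pvAGo (s : String) : List Char → Bool
  | [] => true
  | ch :: rest => if PySem.Str.find s (String.ofList [ch]) ≥ 0 then false else pvAGo s rest

def MemberVariableNamePattenMatch (in_string : String) : Bool :=
  pvAGo in_string ['.', '[', ']']

-- ===== PORT B =====
-- loop 'for ch in in_string': if ch in frozenset(".[]") return False; after the loop return True
def pvBGo : List Char → Bool
  | [] => true
  | c :: rest => if c ∈ ['.', '[', ']'] then false else pvBGo rest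

def MemberVariableNamePattenMatch_alt (in_string : String) : Bool :=
  pvBGo in_string.toList

-- ===== PRECONDITION & SPEC =====
def Spec_MemberVariableNamePattenMatch (in_string : String) (out : Bool) : Prop := out = MemberVariableNamePattenMatch_alt in_string
instance (in_string : String) (out : Bool) : Decidable (Spec_MemberVariableNamePattenMatch in_string out) := by unfold Spec_MemberVariableNamePattenMatch; infer_instance

-- ===== CLAIM (what is proved, stated in full; the proofs are below) =====
def Claim_equal_MemberVariableNamePattenMatch : Prop := ∀ (in_string : String), Dom_MemberVariableNamePattenMatch in_string → Spec_MemberVariableNamePattenMatch in_string (MemberVariableNamePattenMatch in_string)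

-- ===== LEMMAS AND PROOFS =====

lemma pv_singleton_infix {c : Char} {l : List Char} : [c] <:+: l ↔ c ∈ l := by
  constructor
  · intro h; exact h.mem (List.mem_singleton_self c)
  · intro h
    obtain ⟨p, q, hpq⟩ := List.append_of_mem h
    exact ⟨p, q, by simp [hpq]⟩

lemma pvAGo_eq_true {s : String} {cs : List Char} :
    pvAGo s cs = true ↔ ∀ c ∈ cs, c ∉ s.toList := by
  induction cs with
  | nil => simp [pvAGo]
  | cons ch rest ih =>
    have hfind : (PySem.Str.find s (String.ofList [ch]) ≥ 0) ↔ ch ∈ s.toList := by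
      rw [ge_iff_le, PySem.Str.find_nonneg_iff]
      simpa using (pv_singleton_infix (c := ch) (l := s.toList))
    by_cases h : PySem.Str.find s (String.ofList [ch]) ≥ 0
    · rw [pvAGo, if_pos h]
      simp only [Bool.false_eq_true, false_iff]
      intro hall
      exact hall ch (List.mem_cons_self ..) (hfind.mp h)
    · rw [pvAGo, if_neg h, ih]
      constructor
      · intro hall c hc
        rcases List.mem_cons.mp hc with rfl | hc'
        · exact fun hm => h (hfind.mpr hm)
        · exact hall c hc'
      · intro hall c hc
        exact hall c (List.mem_cons_of_mem _ hc)

lemma pvBGo_eq_true {l : List Char} :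
    pvBGo l = true ↔ ∀ c ∈ l, c ∉ (['.', '[', ']'] : List Char) := by
  induction l with
  | nil => simp [pvBGo]
  | cons c rest ih =>
    by_cases h : c ∈ (['.', '[', ']'] : List Char)
    · rw [pvBGo, if_pos h]
      simp only [Bool.false_eq_true, false_iff]
      intro hall
      exact hall c (List.mem_cons_self ..) h
    · rw [pvBGo, if_neg h, ih]
      constructor
      · intro hall d hd
        rcases List.mem_cons.mp hd with rfl | hd'
        · exact h
        · exact hall d hd'
      · intro hall d hd
        exact hall d (List.mem_cons_of_mem _ hd)

-- ===== VERDICT =====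
theorem MemberVariableNamePattenMatch_spec : Claim_equal_MemberVariableNamePattenMatch := by
  intro s _
  unfold Spec_MemberVariableNamePattenMatch
  have : MemberVariableNamePattenMatch s = true ↔ MemberVariableNamePattenMatch_alt s = true := by
    unfold MemberVariableNamePattenMatch MemberVariableNamePattenMatch_alt
    rw [pvAGo_eq_true, pvBGo_eq_true]
    constructor
    · intro h c hc hmem; exact h c hmem hc
    · intro h c hc hmem; exact h c hmem hc
  cases hA : MemberVariableNamePattenMatch s <;> cases hB : MemberVariableNamePattenMatch_alt s <;>
    simp_all
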